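-- pv_equiv track=rewrite | github.com/miliar/Code_Jam_Webscraper | Solutions_python/Problem_178/4328.py | solution
-- ===== SOURCE A (Python) =====
-- def solution(s):
--     flag = True
--     count = 0
--     for i in range(len(s)):
--         if s[i] == '-' and flag is True:
--             if i == 0:
--                 count += 1
--             else:
--                 count += 2
--             flag = False
--         elif s[i] == '+' and flag is False:
--             flag = True
--     return count
-- ===== SOURCE B (Python) =====
-- def solution(s):
--     t = [c for c in s if c in '+-']
--     runs = sum(1 for i, c in enumerate(t)
--                if c == '-' and (i == 0 or t[i - 1] == '+'))
--     return 2 * runs - (1 if s.startswith('-') else 0)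
-- ===== Notes on version B (the rewrite author's own statement) =====
-- stated objective: simpler
-- what changed: Replaces the running flag/index state machine with a closed expression: filter the string to its sign characters, count maximal '-'-runs by a pairwise run-start scan, and return 2*runs minus 1 when the string starts with '-'.
import Mathlib
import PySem

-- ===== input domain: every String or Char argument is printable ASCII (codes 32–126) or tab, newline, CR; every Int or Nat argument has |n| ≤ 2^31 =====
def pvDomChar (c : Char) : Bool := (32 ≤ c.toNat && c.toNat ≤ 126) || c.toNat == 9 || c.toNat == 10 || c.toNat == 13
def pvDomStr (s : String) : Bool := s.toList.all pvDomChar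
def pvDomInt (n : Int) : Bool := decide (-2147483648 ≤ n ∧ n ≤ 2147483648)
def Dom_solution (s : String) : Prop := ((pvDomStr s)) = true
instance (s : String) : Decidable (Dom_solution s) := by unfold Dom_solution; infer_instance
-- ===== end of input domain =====

-- B replaces A's running flag/index state machine by a closed expression over a
-- filtered sign list (objective: simpler).

-- ===== PORT A =====
-- loop over the characters with A's state (flag, count) and the running index i
def solutionLoop : List Char → Bool → Int → Nat → Int
  | [], _, count, _ => count
  | c :: rest, flag, count, i =>
    if c == '-' && flag then
      solutionLoop rest false (count + (if i == 0 then 1 else 2)) (i + 1)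
    else if c == '+' && !flag then
      solutionLoop rest true count (i + 1)
    else
      solutionLoop rest flag count (i + 1)

def solution (s : String) : Int := solutionLoop s.toList true 0 0

-- ===== PORT B =====
-- run-start scan of Source B: count c='-' with (i == 0 or t[i-1] == '+'); prev carries t[i-1]
def runStarts : List Char → Option Char → Int
  | [], _ => 0
  | c :: rest, prev =>
    (if c == '-' && (prev == none || prev == some '+') then 1 else 0) + runStarts rest (some c)

def solution_alt (s : String) : Int :=
  let t := s.toList.filter (fun c => c == '+' || c == '-')
  2 * runStarts t none - (if s.toList.headD ' ' == '-' then 1 else 0)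

-- ===== PRECONDITION & SPEC =====
def Spec_solution (s : String) (out : Int) : Prop := out = solution_alt s
instance (s : String) (out : Int) : Decidable (Spec_solution s out) := by unfold Spec_solution; infer_instance

-- ===== CLAIM (what is proved, stated in full; the proofs are below) =====
def Claim_equal_solution : Prop := ∀ (s : String), Dom_solution s → Spec_solution s (solution s)

-- ===== LEMMAS AND PROOFS =====

-- the filter predicate used by B
def pvSign (c : Char) : Bool := c == '+' || c == '-'

lemma filter_pvSign (l : List Char) :
    l.filter (fun c => c == '+' || c == '-') = l.filter pvSign := rfl

-- with a '+'-or-none predecessor a leading '-' counts either way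
lemma runStarts_none_eq_plus (l : List Char) :
    runStarts l none = runStarts l (some '+') := by
  cases l with
  | nil => rfl
  | cons c rest => simp [runStarts]

-- invariant: past index 0, A's loop equals count + 2 · run-starts of the filtered rest,
-- with A's flag encoded as the predecessor character seen by B's scan
lemma loop_eq (l : List Char) : ∀ (flag : Bool) (count : Int) (i : Nat), i ≠ 0 →
    solutionLoop l flag count i
      = count + 2 * runStarts (l.filter pvSign) (some (if flag then '+' else '-')) := by
  induction l with
  | nil => intro flag count i _; simp [solutionLoop, runStarts]
  | cons c rest ih =>
    intro flag count i hi
    have h0 : (i == 0) = false := by simpa using hi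
    by_cases hminus : c = '-'
    · subst hminus
      cases flag with
      | true =>
        rw [show solutionLoop ('-' :: rest) true count i
              = solutionLoop rest false (count + 2) (i + 1) by simp [solutionLoop, h0]]
        rw [ih false (count + 2) (i + 1) (Nat.succ_ne_zero i)]
        simp [pvSign, List.filter, runStarts]
        ring
      | false =>
        rw [show solutionLoop ('-' :: rest) false count i
              = solutionLoop rest false count (i + 1) by simp [solutionLoop]]
        rw [ih false count (i + 1) (Nat.succ_ne_zero i)]
        simp [pvSign, List.filter, runStarts]
    · by_cases hplus : c = '+'
      · subst hplus
        cases flag with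
        | true =>
          rw [show solutionLoop ('+' :: rest) true count i
                = solutionLoop rest true count (i + 1) by simp [solutionLoop]]
          rw [ih true count (i + 1) (Nat.succ_ne_zero i)]
          simp [pvSign, List.filter, runStarts]
        | false =>
          rw [show solutionLoop ('+' :: rest) false count i
                = solutionLoop rest true count (i + 1) by simp [solutionLoop]]
          rw [ih true count (i + 1) (Nat.succ_ne_zero i)]
          simp [pvSign, List.filter, runStarts]
      · have h1 : (c == '-') = false := by simp [hminus]
        have h2 : (c == '+') = false := by simp [hplus]
        rw [show solutionLoop (c :: rest) flag count i
              = solutionLoop rest flag count (i + 1) by simp [solutionLoop, h1, h2]]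
        rw [List.filter_cons_of_neg (by simp [pvSign, h1, h2])]
        exact ih flag count (i + 1) (Nat.succ_ne_zero i)

-- ===== VERDICT (by name: the statement is the Claim_ definition above) =====
theorem solution_spec : Claim_equal_solution := by
  intro s _
  show solution s = solution_alt s
  unfold solution solution_alt
  cases hl : s.toList with
  | nil => simp [solutionLoop, runStarts]
  | cons c rest =>
    by_cases hminus : c = '-'
    · subst hminus
      rw [show solutionLoop ('-' :: rest) true 0 0
            = solutionLoop rest false 1 1 by simp [solutionLoop]]
      rw [loop_eq rest false 1 1 (by decide)]
      simp only [filter_pvSign, List.filter]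
      simp [runStarts]
      ring
    · by_cases hplus : c = '+'
      · subst hplus
        rw [show solutionLoop ('+' :: rest) true 0 0
              = solutionLoop rest true 0 1 by simp [solutionLoop]]
        rw [loop_eq rest true 0 1 (by decide)]
        simp only [filter_pvSign]
        simp [pvSign, List.filter, runStarts, runStarts_none_eq_plus]
      · have h1 : (c == '-') = false := by simp [hminus]
        have h2 : (c == '+') = false := by simp [hplus]
        rw [show solutionLoop (c :: rest) true 0 0
              = solutionLoop rest true 0 1 by simp [solutionLoop, h1, h2]]
        simp only [filter_pvSign]
        rw [List.filter_cons_of_neg (by simp [pvSign, h1, h2])]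
        simp [h1, runStarts_none_eq_plus, loop_eq rest true 0 1 (by decide)]
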